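-- pv_equiv track=rewrite | github.com/cherry220-v/Voznyak_Python | PZ/PZ-6/pz6.2.py | findLMax
-- ===== SOURCE A (Python) =====
-- def findLMax(lst):
--     n = len(lst)
--     if n == 1: return 0 # Единственный элемент автоматически является локальным максимумом
--
--     lastIndex = None  # Переменная для хранения индекса последнего локального максимума
--     if lst[0] > lst[1]: lastIndex = 0
--
--     # Проверка элементов с 1 до n-2
--     for i in range(1, n - 1):
--         if lst[i] > lst[i - 1] and lst[i] > lst[i + 1]:
--             lastIndex = i
--
--     # Проверка последнего элемента
--     if lst[-1] > lst[-2]: lastIndex = n - 1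
--     return lastIndex
-- ===== SOURCE B (Python) =====
-- def findLMax(lst):
--     n = len(lst)
--     if n == 1:
--         return 0
--     for i in range(n - 1, -1, -1):
--         if (i == 0 or lst[i] > lst[i - 1]) and (i == n - 1 or lst[i] > lst[i + 1]):
--             return i
--     return None
-- ===== Notes on version B (the rewrite author's own statement) =====
-- stated objective: alternative
-- what changed: B scans backward from the end with a single boundary-aware local-max test and returns at the first hit (the last local maximum), instead of A's full forward pass with three separate boundary checks overwriting a lastIndex variable.
import Mathlib
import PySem

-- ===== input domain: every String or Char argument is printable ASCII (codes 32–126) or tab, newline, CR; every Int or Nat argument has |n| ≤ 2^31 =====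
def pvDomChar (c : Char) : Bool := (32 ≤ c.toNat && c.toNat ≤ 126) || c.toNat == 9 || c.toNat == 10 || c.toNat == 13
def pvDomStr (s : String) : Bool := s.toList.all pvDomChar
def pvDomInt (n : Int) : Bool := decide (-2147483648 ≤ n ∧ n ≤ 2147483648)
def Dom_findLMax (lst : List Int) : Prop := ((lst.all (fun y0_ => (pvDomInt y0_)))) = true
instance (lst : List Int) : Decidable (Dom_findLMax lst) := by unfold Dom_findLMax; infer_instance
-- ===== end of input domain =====

-- B differs from A by scanning backward with one boundary-aware local-max test and an early exit
-- at the last local maximum, instead of A's full forward pass with three separate boundary checks.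

-- ===== PORT A =====
def findLMax (lst : List Int) : Option Int :=
  let n : Int := lst.length
  if n = 1 then some 0
  else
    let lastIndex : Option Int :=
      if PySem.List.pyGetD lst 0 0 > PySem.List.pyGetD lst 1 0 then some 0 else none
    let lastIndex :=
      (PySem.List.pyRange 1 (n - 1) 1).foldl (fun acc i =>
        if PySem.List.pyGetD lst i 0 > PySem.List.pyGetD lst (i - 1) 0 ∧
           PySem.List.pyGetD lst i 0 > PySem.List.pyGetD lst (i + 1) 0 then some i else acc) lastIndex
    if PySem.List.pyGetD lst (-1) 0 > PySem.List.pyGetD lst (-2) 0 then some (n - 1) else lastIndex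

-- ===== PORT B =====
-- boundary-aware local-max test, exactly B's `(i == 0 or …) and (i == n-1 or …)`
def lmaxCond (lst : List Int) (n i : Int) : Bool :=
  (i == 0 || PySem.List.pyGetD lst i 0 > PySem.List.pyGetD lst (i - 1) 0) &&
  (i == n - 1 || PySem.List.pyGetD lst i 0 > PySem.List.pyGetD lst (i + 1) 0)

-- B's `for i in range(n-1, -1, -1): if cond: return i` is the first hit of the countdown range
def findLMax_alt (lst : List Int) : Option Int :=
  let n : Int := lst.length
  if n = 1 then some 0
  else (PySem.List.pyRange (n - 1) (-1) (-1)).find? (lmaxCond lst n)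

-- ===== PRECONDITION & SPEC =====
-- Pre_ excludes only the empty list, where A raises IndexError comparing the first two elements.
def Pre_findLMax (lst : List Int) : Prop := lst ≠ []
instance (lst : List Int) : Decidable (Pre_findLMax lst) := by unfold Pre_findLMax; infer_instance

def pvWitness_findLMax : List Int := [1, 3, 2]

def Spec_findLMax (lst : List Int) (out : Option Int) : Prop := out = findLMax_alt lst
instance (lst : List Int) (out : Option Int) : Decidable (Spec_findLMax lst out) := by unfold Spec_findLMax; infer_instance

-- ===== CLAIM (what is proved, stated in full; the proofs are below) =====
def Claim_equal_findLMax : Prop := ∀ (lst : List Int), Dom_findLMax lst → Pre_findLMax lst → Spec_findLMax lst (findLMax lst)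

-- ===== LEMMAS AND PROOFS =====

-- A's loop shape: a fold that keeps the LAST index satisfying P equals find? over the reversed list
theorem foldl_last_eq_find_reverse (P : Int → Bool) (xs : List Int) (acc : Option Int) :
    xs.foldl (fun a i => if P i then some i else a) acc
      = (xs.reverse.find? P).or acc := by
  induction xs generalizing acc with
  | nil => simp
  | cons x xs ih =>
    simp only [List.foldl_cons, ih, List.reverse_cons, List.find?_append]
    cases h : xs.reverse.find? P <;> cases hp : P x <;> simp [List.find?, hp, Option.or]

-- Python's negative index: lst[-k] is lst[len-k] when 0 < k ≤ len
theorem pyGetD_neg (xs : List Int) (k : Int) (hk0 : 0 < k) (hk : k ≤ xs.length) (d : Int) :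
    PySem.List.pyGetD xs (-k) d = PySem.List.pyGetD xs ((xs.length : Int) - k) d := by
  simp only [PySem.List.pyGetD, PySem.List.pyGet?, PySem.List.pyIdx?]
  rw [if_neg (by omega : ¬ (0 ≤ -k)), if_pos (by omega : -(xs.length:Int) ≤ -k),
      if_pos (by omega : (0:Int) ≤ (xs.length:Int) - k), if_pos (by omega : (xs.length:Int) - k < (xs.length:Int))]
  have h : xs.length - (-(-k)).toNat = ((xs.length:Int) - k).toNat := by omega
  rw [h]

-- ===== VERDICT (by name: the statement is the Claim_ definition above) =====
theorem findLMax_spec : Claim_equal_findLMax := by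
  intro lst _ hpre
  unfold Spec_findLMax findLMax findLMax_alt
  by_cases h1 : ((lst.length : Int)) = 1
  · simp [h1]
  · have hne : 0 < lst.length := List.length_pos_of_ne_nil hpre
    have h2 : 2 ≤ (lst.length : Int) := by omega
    simp only [if_neg h1]
    set n : Int := (lst.length : Int) with hn
    rw [PySem.List.pyRange_neg_one_eq_reverse, (by ring : (-1:Int) + 1 = 0), (by ring : n - 1 + 1 = n)]
    have hsplit : PySem.List.pyRange 0 n 1 = 0 :: (PySem.List.pyRange 1 (n-1) 1 ++ [n-1]) := by
      rw [PySem.List.pyRange_one_cons (by omega : (0:Int) < n)]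
      have hs := PySem.List.pyRange_one_succ_right (a := 1) (b := n-1) (by omega)
      rw [show n - 1 + 1 = n by ring] at hs
      norm_num [hs]
    have key := foldl_last_eq_find_reverse (lmaxCond lst n) (PySem.List.pyRange 0 n 1) none
    rw [hsplit] at key
    simp only [List.foldl_append, List.foldl] at key
    rw [Option.or_none] at key
    rw [hsplit, ← key]
    rw [pyGetD_neg lst 1 (by omega) (by omega), pyGetD_neg lst 2 (by omega) (by omega)]
    have c0 : lmaxCond lst n 0 = decide (PySem.List.pyGetD lst 0 0 > PySem.List.pyGetD lst 1 0) := by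
      simp [lmaxCond, show ¬((0:Int) = n - 1) by omega]
    have clast : lmaxCond lst n (n-1) = decide (PySem.List.pyGetD lst (n-1) 0 > PySem.List.pyGetD lst (n-2) 0) := by
      simp [lmaxCond, show ¬((n-1:Int) = 0) by omega, show n - 1 - 1 = n - 2 by ring]
    have cmid : ∀ (acc : Option Int), ∀ i ∈ PySem.List.pyRange 1 (n-1) 1,
        (if PySem.List.pyGetD lst i 0 > PySem.List.pyGetD lst (i - 1) 0 ∧
            PySem.List.pyGetD lst i 0 > PySem.List.pyGetD lst (i + 1) 0 then some i else acc)
        = (if lmaxCond lst n i then some i else acc) := by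
      intro acc i hi
      rw [PySem.List.mem_pyRange_one] at hi
      simp [lmaxCond, show ¬(i = 0) by omega, show ¬(i = n - 1) by omega, and_comm]
    rw [← hn]
    rw [PySem.List.foldl_congr_mem _ _ _ _ cmid, clast, c0]
    simp
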